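-- pv_equiv track=rewrite | github.com/teretzdev/meetme-autorespond | .venv/Lib/site-packages/mentat/command/commands/search.py | _parse_include_input
-- ===== SOURCE A (Python) =====
-- from typing import List, Set
--
-- def _parse_include_input(user_input: str, max_num: int) -> Set[int] | None:
--     nums: Set[int] = set()
--     for part in user_input.split():
--         left_right = part.split("-")
--         if len(left_right) > 2:
--             return None
--         elif len(left_right) == 2:
--             if not left_right[0].isdigit() or not left_right[1].isdigit():
--                 return None
--             nums.update(range(int(left_right[0]), int(left_right[1]) + 1))
--         else:
--             if not part.isdigit():
--                 return None
--             nums.add(int(part))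
--     nums = set(num for num in nums if num > 0 and num <= max_num)
--     if not nums:
--         return None
--     return nums
-- ===== SOURCE B (Python) =====
-- from typing import Set, Optional, Tuple
--
--
-- def _span_digits(s: str) -> Tuple[str, str]:
--     # longest ASCII-digit prefix of s, and the remainder
--     i = 0
--     while i < len(s) and '0' <= s[i] <= '9':
--         i += 1
--     return s[:i], s[i:]
--
--
-- def _parse_token(tok: str) -> Optional[Tuple[int, int]]:
--     # hand-rolled scanner: digits, optionally '-' digits, nothing else
--     head, rest = _span_digits(tok)
--     if not head:
--         return None
--     if not rest:
--         v = int(head)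
--         return (v, v)
--     if rest[0] == '-':
--         tail, extra = _span_digits(rest[1:])
--         if not tail or extra:
--             return None
--         return (int(head), int(tail))
--     return None
--
--
-- def _parse_include_input(user_input: str, max_num: int) -> Set[int] | None:
--     nums: Set[int] = set()
--     for tok in user_input.split():
--         pair = _parse_token(tok)
--         if pair is None:
--             return None
--         lo, hi = pair
--         nums.update(range(max(1, lo), min(max_num, hi) + 1))
--     return nums or None
-- ===== Notes on version B (the rewrite author's own statement) =====
-- stated objective: alternative
-- what changed: B replaces A's split('-')/isdigit/int token validation by a hand-rolled character scanner (span of digits, optional '-', span of digits) and folds A's post-hoc >0/<=max_num filter into the expansion bounds (range(max(1,lo), min(max_num,hi)+1)), so neither split-on-dash nor the final filtering pass exists in B.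
import Mathlib
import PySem

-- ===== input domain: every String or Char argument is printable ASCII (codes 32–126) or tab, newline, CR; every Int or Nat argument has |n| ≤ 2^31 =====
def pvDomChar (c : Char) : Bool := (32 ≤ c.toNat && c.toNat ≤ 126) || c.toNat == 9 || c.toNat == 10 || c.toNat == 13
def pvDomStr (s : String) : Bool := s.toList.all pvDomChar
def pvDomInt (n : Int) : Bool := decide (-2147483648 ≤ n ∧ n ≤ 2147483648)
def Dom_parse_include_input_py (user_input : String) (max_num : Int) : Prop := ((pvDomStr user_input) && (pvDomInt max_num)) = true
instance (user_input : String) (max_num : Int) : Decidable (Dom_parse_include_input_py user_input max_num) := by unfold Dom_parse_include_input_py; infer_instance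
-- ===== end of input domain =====

-- B replaces A's split("-")/isdigit/int token handling by a hand-rolled digit scanner (span of
-- digits, optional '-', span of digits) and folds A's post-hoc >0/<=max_num filter into the
-- range bounds (expand max(1,lo)..min(max_num,hi)); same return value, objective: alternative.

-- ===== PORT A =====
-- int(s), reached only after s.isdigit() succeeded, so ofStr? is some there; getD 0 is unreachable
def pvInt (s : String) : Int := (PySem.Int.ofStr? s).getD 0

-- part.split("-"): sep is the nonempty literal "-", so split? is always some; getD [] unreachable
def pvSplitDash (part : String) : List String := (PySem.Str.split? part "-").getD []

-- the 'for part in user_input.split()' loop of A, accumulating the set `nums`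
def pvALoop : List String → PySem.Set Int → Option (PySem.Set Int)
  | [], nums => some nums
  | part :: rest, nums =>
    let lr := pvSplitDash part
    if lr.length > 2 then none
    else if lr.length = 2 then
      if !(PySem.Str.strIsdigit (lr.getD 0 "")) || !(PySem.Str.strIsdigit (lr.getD 1 "")) then none
      else pvALoop rest (PySem.Set.update nums
        (PySem.List.pyRange (pvInt (lr.getD 0 "")) (pvInt (lr.getD 1 "") + 1) 1))
    else
      if !(PySem.Str.strIsdigit part) then none
      else pvALoop rest (PySem.Set.add nums (pvInt part))

def parse_include_input_py (user_input : String) (max_num : Int) : Option (List Int) :=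
  match pvALoop (PySem.Str.split₀ user_input) PySem.Set.empty with
  | none => none
  | some nums =>
    let nums2 : PySem.Set Int :=
      PySem.Set.ofList (nums.filter (fun n => decide (0 < n ∧ n ≤ max_num)))
    if nums2.isEmpty then none else some nums2

-- ===== PORT B =====
-- int(ds), reached only on nonempty all-digit ds, so ofChars? is some there; getD 0 unreachable
def pvIntC (ds : List Char) : Int := (PySem.Int.ofChars? ds).getD 0

-- _span_digits: longest ASCII-digit prefix and the remainder (the while loop over s)
def pvSpanDigits : List Char → List Char × List Char
  | [] => ([], [])
  | c :: t =>
    if '0' ≤ c ∧ c ≤ '9' then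
      let p := pvSpanDigits t
      (c :: p.1, p.2)
    else ([], c :: t)

-- _parse_token: digits, optionally '-' digits, nothing else
def pvParseTok (cs : List Char) : Option (Int × Int) :=
  match pvSpanDigits cs with
  | ([], _) => none
  | (head, []) => some (pvIntC head, pvIntC head)
  | (head, c :: r2) =>
    if c = '-' then
      match pvSpanDigits r2 with
      | ([], _) => none
      | (_, _ :: _) => none
      | (tail, []) => some (pvIntC head, pvIntC tail)
    else none

-- the 'for tok in user_input.split()' loop of B: parse, then expand clamped to [1, max_num]
def pvBLoop (m : Int) : List String → PySem.Set Int → Option (PySem.Set Int)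
  | [], nums => some nums
  | tok :: rest, nums =>
    match pvParseTok tok.toList with
    | none => none
    | some lohi =>
      pvBLoop m rest (PySem.Set.update nums
        (PySem.List.pyRange (max 1 lohi.1) (min m lohi.2 + 1) 1))

def parse_include_input_py_alt (user_input : String) (max_num : Int) : Option (List Int) :=
  match pvBLoop max_num (PySem.Str.split₀ user_input) PySem.Set.empty with
  | none => none
  | some nums => if nums.isEmpty then none else some nums

-- ===== PRECONDITION & SPEC =====
def Spec_parse_include_input_py (user_input : String) (max_num : Int) (out : Option (List Int)) : Prop := out = parse_include_input_py_alt user_input max_num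
instance (user_input : String) (max_num : Int) (out : Option (List Int)) : Decidable (Spec_parse_include_input_py user_input max_num out) := by unfold Spec_parse_include_input_py; infer_instance

-- ===== CLAIM (what is proved, stated in full; the proofs are below) =====
def Claim_equal_parse_include_input_py : Prop := ∀ (user_input : String) (max_num : Int), Dom_parse_include_input_py user_input max_num → Spec_parse_include_input_py user_input max_num (parse_include_input_py user_input max_num)

-- ===== LEMMAS AND PROOFS =====

-- ---- characterizing split("-") ----

def pvPartsD (l : List Char) : List (List Char) :=
  (l.takeWhile (· ≠ '-')) ::
    (match h : l.dropWhile (· ≠ '-') with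
     | [] => []
     | _ :: t => pvPartsD t)
termination_by l.length
decreasing_by
  have := List.length_dropWhile_le (fun c => decide (c ≠ '-')) l
  rw [h] at this
  simp at this; omega

theorem pvPartsD_drop_nil {l : List Char} (h : l.dropWhile (· ≠ '-') = []) :
    pvPartsD l = [l.takeWhile (· ≠ '-')] := by
  rw [pvPartsD]
  split
  · rfl
  · next x t heq => rw [h] at heq; cases heq

theorem pvPartsD_drop_cons {l d : List Char} {x : Char} (h : l.dropWhile (· ≠ '-') = x :: d) :
    pvPartsD l = (l.takeWhile (· ≠ '-')) :: pvPartsD d := by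
  rw [pvPartsD]
  split
  · next heq => rw [h] at heq; cases heq
  · next y t heq =>
      rw [h] at heq
      injection heq with h1 h2
      rw [h2]

theorem pvPartsD_cons_self (l : List Char) :
    (pvPartsD l).headI :: (pvPartsD l).tail = pvPartsD l := by
  cases hd : l.dropWhile (· ≠ '-') with
  | nil => rw [pvPartsD_drop_nil hd]; simp
  | cons x d => rw [pvPartsD_drop_cons hd]; simp

theorem pv_go_nil (fuel : Nat) (cur : List Char) (acc : List (List Char)) :
    PySem.Chars.splitOn.go ['-'] (fuel+1) [] cur acc = (cur.reverse :: acc).reverse := by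
  rw [PySem.Chars.splitOn.go]
  exact fun h => by omega

theorem pv_go_cons (fuel : Nat) (c : Char) (rest cur : List Char) (acc : List (List Char)) :
    PySem.Chars.splitOn.go ['-'] (fuel+1) (c :: rest) cur acc
      = if c = '-' then PySem.Chars.splitOn.go ['-'] fuel rest [] (cur.reverse :: acc)
        else PySem.Chars.splitOn.go ['-'] fuel rest (c :: cur) acc := by
  rw [PySem.Chars.splitOn.go]
  by_cases hc : c = '-'
  · subst hc; simp [List.isPrefixOf]
  · have : ('-' == c) = false := by simp; exact fun e => hc e.symm
    simp [List.isPrefixOf, this, hc]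

theorem pv_go_eq : ∀ (fuel : Nat), ∀ (l cur : List Char) (acc : List (List Char)),
    l.length < fuel →
    PySem.Chars.splitOn.go ['-'] fuel l cur acc
      = acc.reverse ++ ((cur.reverse ++ (pvPartsD l).headI) :: (pvPartsD l).tail) := by
  intro fuel
  induction fuel with
  | zero => intro l cur acc h; omega
  | succ fuel ih =>
      intro l cur acc h
      cases l with
      | nil =>
          rw [pv_go_nil, pvPartsD_drop_nil (by simp)]
          simp
      | cons c rest =>
          rw [pv_go_cons]
          by_cases hc : c = '-'
          · subst hc
            rw [if_pos rfl]
            rw [ih _ _ _ (by simpa using h)]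
            rw [pvPartsD_drop_cons (l := '-' :: rest) (x := '-') (d := rest) (by simp)]
            rw [← pvPartsD_cons_self rest]
            simp
          · rw [if_neg hc]
            rw [ih _ _ _ (by simpa using h)]
            have ht : (c :: rest).takeWhile (· ≠ '-') = c :: rest.takeWhile (· ≠ '-') := by
              simp [hc]
            have hdr : (c :: rest).dropWhile (· ≠ '-') = rest.dropWhile (· ≠ '-') := by
              simp [hc]
            cases hd : rest.dropWhile (· ≠ '-') with
            | nil =>
                rw [pvPartsD_drop_nil hd, pvPartsD_drop_nil (hdr.trans hd), ht]
                simp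
            | cons x d =>
                rw [pvPartsD_drop_cons hd, pvPartsD_drop_cons (hdr.trans hd), ht]
                simp

theorem pv_splitOn_dash (cs : List Char) :
    PySem.Chars.splitOn cs ['-'] = pvPartsD cs := by
  rw [PySem.Chars.splitOn]
  rw [pv_go_eq (cs.length + 1) cs [] [] (by omega)]
  rw [← pvPartsD_cons_self cs]
  simp

-- ---- the digit scanner vs takeWhile/dropWhile ----

def pvIsD (c : Char) : Bool := decide ('0' ≤ c) && decide (c ≤ '9')

theorem pv_spanDigits_eq (l : List Char) :
    pvSpanDigits l = (l.takeWhile pvIsD, l.dropWhile pvIsD) := by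
  induction l with
  | nil => rfl
  | cons c t ih =>
      by_cases h : '0' ≤ c ∧ c ≤ '9' <;>
        simp [pvSpanDigits, pvIsD, h, ih]

-- ---- A's per-token decision, at the character level ----

def pvTokA (cs : List Char) : Option (Int × Int) :=
  let lr := PySem.Chars.splitOn cs ['-']
  if lr.length > 2 then none
  else if lr.length = 2 then
    if !(PySem.Chars.strIsdigit (lr.getD 0 [])) || !(PySem.Chars.strIsdigit (lr.getD 1 [])) then none
    else some (pvIntC (lr.getD 0 []), pvIntC (lr.getD 1 []))
  else
    if !(PySem.Chars.strIsdigit cs) then none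
    else some (pvIntC cs, pvIntC cs)

-- ===== small facts =====
theorem pv_digit_ne_dash {c : Char} (h : pvIsD c = true) : c ≠ '-' := by
  intro e; subst e; simp [pvIsD] at h

theorem pv_strIsdigit_eq_all (l : List Char) :
    PySem.Chars.strIsdigit l = (!l.isEmpty && l.all pvIsD) := rfl

theorem pv_strIsdigit_true {l : List Char} (hne : l ≠ []) (h : ∀ c ∈ l, pvIsD c) :
    PySem.Chars.strIsdigit l = true := by
  rw [pv_strIsdigit_eq_all]
  simp [hne]
  exact fun c hc => h c hc

theorem pv_strIsdigit_false_mem {l : List Char} {c : Char} (hc : c ∈ l) (h : pvIsD c = false) :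
    PySem.Chars.strIsdigit l = false := by
  rw [pv_strIsdigit_eq_all]
  simp
  intro _
  exact ⟨c, hc, by simp [h]⟩

theorem pv_drop_head_false {p : Char → Bool} {l t : List Char} {c : Char}
    (h : l.dropWhile p = c :: t) : p c = false := by
  have h2 : l.dropWhile p ≠ [] := by rw [h]; simp
  have h3 := List.head_dropWhile_not p h2
  simp only [h] at h3
  simpa using h3

theorem pv_takeWhile_dash_of_no_dash {a : List Char} (h : '-' ∉ a) (b : List Char) :
    (a ++ '-' :: b).takeWhile (· ≠ '-') = a := by
  induction a with
  | nil => simp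
  | cons x t ih =>
      have hx : x ≠ '-' := by intro e; exact h (by simp [e])
      simp only [List.cons_append, List.takeWhile_cons]
      simp [hx]
      simpa using ih (fun m => h (by simp [m]))

theorem pv_dropWhile_dash_of_no_dash {a : List Char} (h : '-' ∉ a) (b : List Char) :
    (a ++ '-' :: b).dropWhile (· ≠ '-') = '-' :: b := by
  induction a with
  | nil => simp
  | cons x t ih =>
      have hx : x ≠ '-' := by intro e; exact h (by simp [e])
      simp only [List.cons_append, List.dropWhile_cons]
      simp [hx]
      simpa using ih (fun m => h (by simp [m]))

theorem pvPartsD_append {a b : List Char} (h : '-' ∉ a) :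
    pvPartsD (a ++ '-' :: b) = a :: pvPartsD b := by
  rw [pvPartsD_drop_cons (pv_dropWhile_dash_of_no_dash h b),
      pv_takeWhile_dash_of_no_dash h b]

theorem pvPartsD_no_dash {l : List Char} (h : '-' ∉ l) : pvPartsD l = [l] := by
  have hd : l.dropWhile (· ≠ '-') = [] :=
    List.dropWhile_eq_nil_iff.2 (fun c hc => by simp; exact fun e => h (e ▸ hc))
  rw [pvPartsD_drop_nil hd, List.takeWhile_eq_self_iff.2 (fun c hc => by
    simp; exact fun e => h (e ▸ hc))]

theorem pvPartsD_len2 {l : List Char} (h : '-' ∈ l) : 2 ≤ (pvPartsD l).length := by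
  have hd : l.dropWhile (· ≠ '-') ≠ [] := by
    intro he
    have := List.dropWhile_eq_nil_iff.1 he '-' h
    simp at this
  cases hc : l.dropWhile (· ≠ '-') with
  | nil => exact absurd hc hd
  | cons x d =>
      rw [pvPartsD_drop_cons hc]
      have : pvPartsD d ≠ [] := by
        rw [← pvPartsD_cons_self d]; simp
      cases hq : pvPartsD d with
      | nil => exact absurd hq this
      | cons _ _ => simp

theorem pv_mem_takeWhile_dash {a : List Char} (h : '-' ∉ a) {c : Char} (hc : c ≠ '-')
    (b : List Char) : c ∈ (a ++ c :: b).takeWhile (· ≠ '-') := by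
  induction a with
  | nil => simp [hc]
  | cons x t ih =>
      have hx : x ≠ '-' := by intro e; exact h (by simp [e])
      simp only [List.cons_append, List.takeWhile_cons]
      simp [hx]
      right
      simpa using ih (fun m => h (by simp [m]))

theorem pvPartsD_ne_nil (l : List Char) : pvPartsD l ≠ [] := by
  rw [← pvPartsD_cons_self l]; simp

theorem pv_tok_eq (cs : List Char) : pvTokA cs = pvParseTok cs := by
  have hcs : cs.takeWhile pvIsD ++ cs.dropWhile pvIsD = cs := List.takeWhile_append_dropWhile
  unfold pvParseTok pvTokA
  rw [pv_spanDigits_eq, pv_splitOn_dash]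
  have hall_ds : ∀ x ∈ cs.takeWhile pvIsD, pvIsD x := fun x hx => List.mem_takeWhile_imp hx
  have hnod_ds : '-' ∉ cs.takeWhile pvIsD := fun hm => (pv_digit_ne_dash (hall_ds _ hm)) rfl
  cases hr : cs.dropWhile pvIsD with
  | nil =>
      have hall : ∀ c ∈ cs, pvIsD c := List.dropWhile_eq_nil_iff.1 hr
      have htw : cs.takeWhile pvIsD = cs := List.takeWhile_eq_self_iff.2 hall
      have hnod : '-' ∉ cs := fun hm => (pv_digit_ne_dash (hall _ hm)) rfl
      rw [htw, pvPartsD_no_dash hnod]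
      cases cs with
      | nil => simp [PySem.Chars.strIsdigit]
      | cons d t =>
          have h1 : PySem.Chars.strIsdigit (d :: t) = true :=
            pv_strIsdigit_true (by simp) hall
          simp [h1]
  | cons c r2 =>
      have hcfalse : pvIsD c = false := pv_drop_head_false hr
      have hcs' : cs = cs.takeWhile pvIsD ++ c :: r2 := by rw [← hr, hcs]
      by_cases hc : c = '-'
      · subst hc
        conv_lhs => rw [hcs', pvPartsD_append hnod_ds]
        cases hds : cs.takeWhile pvIsD with
        | nil =>
            by_cases hdr2 : '-' ∈ r2
            · have hlen := pvPartsD_len2 hdr2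
              rw [if_pos (by simp; omega)]
            · rw [pvPartsD_no_dash hdr2]
              simp [PySem.Chars.strIsdigit]
        | cons d dt =>
            show (if ((d :: dt) :: pvPartsD r2).length > 2 then none else _) = _
            cases hr3 : r2.dropWhile pvIsD with
            | nil =>
                have hall2 : ∀ x ∈ r2, pvIsD x := List.dropWhile_eq_nil_iff.1 hr3
                have hnod2 : '-' ∉ r2 := fun hm => (pv_digit_ne_dash (hall2 _ hm)) rfl
                have htw2 : r2.takeWhile pvIsD = r2 := List.takeWhile_eq_self_iff.2 hall2
                rw [pvPartsD_no_dash hnod2]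
                cases r2 with
                | nil => simp [PySem.Chars.strIsdigit, pv_spanDigits_eq]
                | cons e et =>
                    have h1 : PySem.Chars.strIsdigit (d :: dt) = true :=
                      pv_strIsdigit_true (by simp) (fun x hx => hall_ds x (hds ▸ hx))
                    have h2 : PySem.Chars.strIsdigit (e :: et) = true :=
                      pv_strIsdigit_true (by simp) hall2
                    simp [h1, h2, pv_spanDigits_eq, htw2, hr3]
            | cons c2 t3 =>
                have hc2 : pvIsD c2 = false := pv_drop_head_false hr3
                have hc2mem : c2 ∈ r2 := (List.dropWhile_sublist pvIsD).subset (by rw [hr3]; simp)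
                by_cases hdr2 : '-' ∈ r2
                · have hlen := pvPartsD_len2 hdr2
                  rw [if_pos (by simp; omega)]
                  cases htk : r2.takeWhile pvIsD <;> simp [pv_spanDigits_eq, hr3, htk]
                · rw [pvPartsD_no_dash hdr2]
                  have h2 : PySem.Chars.strIsdigit r2 = false := pv_strIsdigit_false_mem hc2mem hc2
                  cases htk : r2.takeWhile pvIsD <;> simp [h2, pv_spanDigits_eq, hr3, htk]
      · -- c is neither a digit nor '-'
        have hcmem : c ∈ (cs.takeWhile pvIsD ++ c :: r2).takeWhile (· ≠ '-') :=
          pv_mem_takeWhile_dash hnod_ds hc r2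
        have hAfalse : PySem.Chars.strIsdigit ((cs.takeWhile pvIsD ++ c :: r2).takeWhile (· ≠ '-')) = false :=
          pv_strIsdigit_false_mem hcmem hcfalse
        have hcmem' : c ∈ cs := by rw [hcs']; simp
        have hAfalse' : PySem.Chars.strIsdigit (cs.takeWhile (· ≠ '-')) = false := by
          conv_lhs => rw [hcs']
          exact hAfalse
        simp only [ne_eq, decide_not] at hAfalse'
        cases hdd : cs.dropWhile (· ≠ '-') with
        | nil =>
            rw [pvPartsD_drop_nil hdd]
            have hA : PySem.Chars.strIsdigit cs = false := pv_strIsdigit_false_mem hcmem' hcfalse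
            cases hds : cs.takeWhile pvIsD with
            | nil => simp [hA]
            | cons d dt => simp [hA, hc]
        | cons y d =>
            rw [pvPartsD_drop_cons hdd]
            by_cases hbig : 2 < ((cs.takeWhile (· ≠ '-')) :: pvPartsD d).length
            · rw [if_pos hbig]
              cases hds : cs.takeWhile pvIsD with
              | nil => rfl
              | cons d2 dt => simp [hc]
            · rw [if_neg hbig]
              have hdne := pvPartsD_ne_nil d
              have hlen2 : ((cs.takeWhile (· ≠ '-')) :: pvPartsD d).length = 2 := by
                cases hq : pvPartsD d with
                | nil => exact absurd hq hdne
                | cons _ _ => simp [hq] at hbig ⊢; omega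
              rw [if_pos hlen2]
              cases hds : cs.takeWhile pvIsD with
              | nil => simp [hAfalse']
              | cons d2 dt => simp [hAfalse', hc]

-- ---- bridging String-level A to character level ----

theorem pv_pvInt_ofList (x : List Char) : pvInt (String.ofList x) = pvIntC x := by
  rw [pvInt, pvIntC, PySem.Int.ofStr?_ofList]

theorem pv_pyRange_nil {a b : Int} (h : b ≤ a) : PySem.List.pyRange a b 1 = [] := by
  cases hq : PySem.List.pyRange a b 1 with
  | nil => rfl
  | cons x t =>
      have hx : x ∈ PySem.List.pyRange a b 1 := by rw [hq]; exact List.mem_cons_self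
      rw [PySem.List.mem_pyRange_one] at hx; omega

theorem pv_stepA (part : String) (rest : List String) (s : PySem.Set Int) :
    pvALoop (part :: rest) s
      = match pvTokA part.toList with
        | none => none
        | some lohi =>
            pvALoop rest (PySem.Set.update s (PySem.List.pyRange lohi.1 (lohi.2 + 1) 1)) := by
  have hsplit : pvSplitDash part
      = List.map String.ofList (PySem.Chars.splitOn part.toList ['-']) := by
    rw [pvSplitDash, PySem.Str.split?]
    rfl
  simp only [pvALoop]
  rw [hsplit]
  unfold pvTokA
  have h2 : pvInt part = pvIntC part.toList := by
    rw [pvInt, pvIntC, PySem.Int.ofStr?]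
  cases hq : PySem.Chars.splitOn part.toList ['-'] with
  | nil =>
      simp [h2]
      cases hd : PySem.Chars.strIsdigit part.toList <;>
        simp [PySem.Set.add, PySem.Set.update]
  | cons a t =>
      cases t with
      | nil =>
          simp only [List.map, List.length, List.getD]
          simp [h2]
          cases hd : PySem.Chars.strIsdigit part.toList <;>
            simp [PySem.Set.add, PySem.Set.update]
      | cons b t2 =>
          cases t2 with
          | nil =>
              simp only [List.map, List.length, List.getD]
              simp [pv_pvInt_ofList]
              cases hda : PySem.Chars.strIsdigit a <;>
                cases hdb : PySem.Chars.strIsdigit b <;> simp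
          | cons c2 t3 => simp

-- ---- clamping = post-filter ----

theorem pv_range_step (m lo hi : Int) (h : lo ≤ hi) :
    PySem.List.pyRange (max 1 lo) (min m hi + 1) 1
      = (if (decide (0 < lo ∧ lo ≤ m)) then [lo] else [])
          ++ PySem.List.pyRange (max 1 (lo + 1)) (min m hi + 1) 1 := by
  by_cases h0 : 0 < lo
  · by_cases hm : lo ≤ m
    · have hmax : max 1 lo = lo := by omega
      have hmax' : max 1 (lo + 1) = lo + 1 := by omega
      have hlt : lo < min m hi + 1 := by omega
      simp only [hmax, hmax', decide_eq_true_eq]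
      rw [PySem.List.pyRange_one_cons hlt]
      simp [h0, hm]
    · have h1 : min m hi + 1 ≤ max 1 lo := by omega
      have h2 : min m hi + 1 ≤ max 1 (lo + 1) := by omega
      rw [pv_pyRange_nil h1, pv_pyRange_nil h2]
      simp [hm]
  · have : max 1 lo = max 1 (lo + 1) := by omega
    simp [h0, this]

theorem pv_filter_pyRange (m lo hi : Int) :
    (PySem.List.pyRange lo (hi + 1) 1).filter (fun n => decide (0 < n ∧ n ≤ m))
      = PySem.List.pyRange (max 1 lo) (min m hi + 1) 1 := by
  have aux : ∀ (k : Nat) (lo : Int), lo ≤ hi → (hi + 1 - lo).toNat ≤ k →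
      (PySem.List.pyRange lo (hi + 1) 1).filter (fun n => decide (0 < n ∧ n ≤ m))
        = PySem.List.pyRange (max 1 lo) (min m hi + 1) 1 := by
    intro k
    induction k with
    | zero => intro lo hle hk; omega
    | succ k ih =>
        intro lo hle hk
        rw [PySem.List.pyRange_one_cons (by omega : lo < hi + 1)]
        rw [List.filter_cons, pv_range_step m lo hi hle]
        by_cases hlo : lo + 1 ≤ hi
        · have hkk : (hi + 1 - (lo + 1)).toNat ≤ k := by omega
          rw [ih (lo + 1) hlo hkk]
          by_cases hp : (0 < lo ∧ lo ≤ m) <;> simp [hp]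
        · have hend : lo = hi := by omega
          subst hend
          rw [pv_pyRange_nil (by omega : lo + 1 ≤ lo + 1)]
          rw [pv_pyRange_nil (by omega : min m lo + 1 ≤ max 1 (lo + 1))]
          by_cases hp : (0 < lo ∧ lo ≤ m) <;> simp [hp]
  by_cases hle : lo ≤ hi
  · exact aux (hi + 1 - lo).toNat lo hle (le_refl _)
  · rw [pv_pyRange_nil (by omega : hi + 1 ≤ lo),
        pv_pyRange_nil (by omega : min m hi + 1 ≤ max 1 lo)]
    rfl

theorem pv_filter_add (p : Int → Bool) (s : PySem.Set Int) (x : Int) :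
    (PySem.Set.add s x).filter p
      = if p x then PySem.Set.add (s.filter p) x else s.filter p := by
  simp only [PySem.Set.add, PySem.Set.contains, List.contains_eq_mem, List.mem_filter,
    decide_eq_true_eq]
  by_cases hp : p x <;> by_cases hm : x ∈ s <;>
    simp [hp, hm, List.filter_append]

theorem pv_filter_update (p : Int → Bool) (xs : List Int) : ∀ (s : PySem.Set Int),
    (PySem.Set.update s xs).filter p = PySem.Set.update (s.filter p) (xs.filter p) := by
  induction xs with
  | nil => intro s; rfl
  | cons x t ih =>
      intro s
      simp only [PySem.Set.update, List.foldl_cons, List.filter_cons]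
      have h := ih (PySem.Set.add s x)
      simp only [PySem.Set.update] at h
      rw [h, pv_filter_add]
      by_cases hp : p x <;> simp [hp]

-- ---- main loop invariant ----

theorem pv_main (m : Int) (parts : List String) : ∀ (s : PySem.Set Int), s.Nodup →
    match pvBLoop m parts (s.filter (fun n => decide (0 < n ∧ n ≤ m))) with
    | none => pvALoop parts s = none
    | some t' => ∃ t, pvALoop parts s = some t ∧ t.Nodup ∧
        t.filter (fun n => decide (0 < n ∧ n ≤ m)) = t' := by
  induction parts with
  | nil => intro s hs; exact ⟨s, rfl, hs, rfl⟩
  | cons part rest ih =>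
      intro s hs
      rw [pv_stepA]
      simp only [pvBLoop]
      rw [← pv_tok_eq part.toList]
      cases htok : pvTokA part.toList with
      | none => simp
      | some lohi =>
          dsimp only
          have hupd : PySem.Set.update (s.filter (fun n => decide (0 < n ∧ n ≤ m)))
              (PySem.List.pyRange (max 1 lohi.1) (min m lohi.2 + 1) 1)
              = (PySem.Set.update s (PySem.List.pyRange lohi.1 (lohi.2 + 1) 1)).filter
                  (fun n => decide (0 < n ∧ n ≤ m)) := by
            rw [pv_filter_update, pv_filter_pyRange]
          rw [hupd]
          exact ih _ (PySem.Set.nodup_update _ _ hs)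

theorem pv_final (u : String) (m : Int) :
    parse_include_input_py u m = parse_include_input_py_alt u m := by
  unfold parse_include_input_py parse_include_input_py_alt
  have h := pv_main m (PySem.Str.split₀ u) PySem.Set.empty List.nodup_nil
  have h0 : (List.filter (fun n => decide (0 < n ∧ n ≤ m)) PySem.Set.empty) = PySem.Set.empty := rfl
  rw [h0] at h
  cases hB : pvBLoop m (PySem.Str.split₀ u) PySem.Set.empty with
  | none =>
      simp only [hB] at h
      rw [h]
  | some t' =>
      simp only [hB] at h
      obtain ⟨t, ht, htn, htf⟩ := h
      simp only [ht]
      rw [PySem.Set.ofList_eq_self_of_nodup _ (htn.filter _), htf]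


-- ===== VERDICT (by name: the statement is the Claim_ definition above) =====
theorem parse_include_input_py_spec : Claim_equal_parse_include_input_py := by
  intro u m _
  unfold Spec_parse_include_input_py
  exact pv_final u m
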